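-- pv_equiv track=rewrite | github.com/Romathonat/MCTSExtent | general/bitset.py | get_support_from_vector
-- ===== SOURCE A (Python) =====
-- import math
--
-- def get_support_from_vector(bitset, bitset_slot_size, first_zero_mask,
--                             last_ones_mask):
--     temp = bitset >> 1
--     temp = temp & first_zero_mask
--
--     bitset |= temp
--
--     temp = bitset
--
--     for i in range(bitset_slot_size - 1):
--         temp = temp >> 1
--         temp = temp & first_zero_mask
--         bitset |= temp
--
--     bitset = bitset & last_ones_mask
--
--     i = bitset.bit_length()
--
--     data_length = math.ceil(i / bitset_slot_size)
--
--     bitset_simple = 0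
--     count = 0
--
--     while i > 0:
--         if bitset >> (i - 1) & 1:
--             bitset_simple |= 1 << (data_length - count - 1)
--
--         count += 1
--         i -= bitset_slot_size
--
--     # now we have a vector with ones or 0 at the end of each slot. We just need to
--     # compute the hamming distance
--     return hamming_weight(bitset_simple), bitset_simple
--
-- def hamming_weight(vector):
--     w = 0
--     while vector:
--         w += 1
--         vector &= vector - 1
--     return w
-- ===== SOURCE B (Python) =====
-- def get_support_from_vector(bitset, bitset_slot_size, first_zero_mask,
--                             last_ones_mask):
--     # smear each slot's bits onto its low end (same as A)
--     temp = (bitset >> 1) & first_zero_mask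
--     bitset |= temp
--     temp = bitset
--     for _ in range(bitset_slot_size - 1):
--         temp = (temp >> 1) & first_zero_mask
--         bitset |= temp
--
--     bitset &= last_ones_mask
--     i = bitset.bit_length()
--
--     # single top-down pass: build the collapsed vector by a Horner step and
--     # count its one-bits on the fly (no ceil-division length, no per-bit
--     # placement shifts, no second popcount pass)
--     bitset_simple = 0
--     count = 0
--     while i > 0:
--         bit = (bitset >> (i - 1)) & 1
--         bitset_simple = bitset_simple * 2 + bit
--         count += bit
--         i -= bitset_slot_size
--     return count, bitset_simple
-- ===== Notes on version B (the rewrite author's own statement) =====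
-- stated objective: simpler
-- what changed: B replaces A's bit-extraction half -- precomputing the collapsed length with math.ceil, placing each slot bit at position length-count-1 by a shift, and a separate Kernighan popcount pass over the collapsed vector -- by a single top-down pass that builds the collapsed vector with a Horner step (simple = simple*2 + bit) and counts the one-bits on the fly; the smear loop is unchanged.
import Mathlib
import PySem

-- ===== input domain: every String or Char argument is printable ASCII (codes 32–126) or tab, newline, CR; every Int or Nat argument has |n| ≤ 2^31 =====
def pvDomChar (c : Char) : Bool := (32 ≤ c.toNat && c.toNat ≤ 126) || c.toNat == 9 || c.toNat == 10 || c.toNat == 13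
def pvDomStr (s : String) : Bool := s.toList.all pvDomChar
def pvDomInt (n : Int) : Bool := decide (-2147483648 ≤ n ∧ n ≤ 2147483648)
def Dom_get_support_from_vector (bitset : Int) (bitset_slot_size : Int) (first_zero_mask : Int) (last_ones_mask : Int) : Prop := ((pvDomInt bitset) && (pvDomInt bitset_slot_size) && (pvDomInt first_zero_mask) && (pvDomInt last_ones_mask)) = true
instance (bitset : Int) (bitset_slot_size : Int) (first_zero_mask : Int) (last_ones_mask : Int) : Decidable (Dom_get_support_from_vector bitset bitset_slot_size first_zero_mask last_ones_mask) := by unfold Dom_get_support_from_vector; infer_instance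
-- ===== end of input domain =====

-- B builds the collapsed vector and its bit count in one top-down pass (Horner step, count on the
-- fly), replacing A's ceil-division length, per-bit placement shifts and separate Kernighan
-- popcount pass; the smear loop is unchanged; objective: simpler.


-- ===== PORT A =====
-- hamming_weight's while loop; fuel = natAbs + 1 bounds the iteration count (one set bit is
-- cleared per step), so on the nonnegative values A feeds it the port is exact
def pvHammingLoop : Nat → Int → Int → Int
  | 0, _, w => w
  | f+1, v, w => if v ≠ 0 then pvHammingLoop f (PySem.Int.band v (v-1)) (w+1) else w

def hamming_weight (vector : Int) : Int := pvHammingLoop (vector.natAbs + 1) vector 0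

-- A's while loop: state (i, count, bitset_simple); fuel bounds the iterations
-- (.toNat on the two shift amounts is exact wherever Python does not raise: in the loop i-1 ≥ 0,
--  and inside Pre_ count < data_length so data_length - count - 1 ≥ 0)
def pvALoop (y slot L : Int) : Nat → Int → Int → Int → Int
  | 0, _, _, s => s
  | f+1, i, c, s =>
    if i > 0 then
      pvALoop y slot L f (i - slot) (c + 1)
        (if PySem.Int.band (y >>> (i-1).toNat) 1 ≠ 0 then PySem.Int.bor s ((1:Int) <<< (L - c - 1).toNat) else s)
    else s

def get_support_from_vector (bitset : Int) (bitset_slot_size : Int) (first_zero_mask : Int) (last_ones_mask : Int) : List Int :=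
  let temp := PySem.Int.band (bitset >>> 1) first_zero_mask
  let b1 := PySem.Int.bor bitset temp
  let tb := (PySem.List.pyRange 0 (bitset_slot_size - 1) 1).foldl
      (fun (tb : Int × Int) _ =>
        let t := PySem.Int.band (tb.1 >>> 1) first_zero_mask
        (t, PySem.Int.bor tb.2 t)) (b1, b1)
  let y := PySem.Int.band tb.2 last_ones_mask
  let i : Nat := PySem.Int.bitLength y
  -- math.ceil(i / bitset_slot_size): exact, i is a small nonnegative int, so the float ratio
  -- rounds to no integer it should not; ceiling division written as -((-i) // slot)
  let data_length : Int := -(PySem.Int.floordiv (-(i:Int)) bitset_slot_size)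
  let simple := pvALoop y bitset_slot_size data_length i (i:Int) 0 0
  [hamming_weight simple, simple]

-- ===== PORT B =====
-- B's smear loop (as in A): temp = (temp >> 1) & mask; bitset |= temp
def pvSmear (fzm : Int) : Nat → Int → Int → Int
  | 0, _, x => x
  | n+1, t, x =>
    let t' := PySem.Int.band (t >>> 1) fzm
    pvSmear fzm n t' (PySem.Int.bor x t')

-- B's single pass: Horner build of the collapsed vector, counting the bits on the fly
def pvBLoop (y slot : Int) : Nat → Int → Int → Int → Int × Int
  | 0, _, c, s => (c, s)
  | f+1, i, c, s =>
    if i > 0 then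
      let b := PySem.Int.band (y >>> (i-1).toNat) 1
      pvBLoop y slot f (i - slot) (c + b) (s * 2 + b)
    else (c, s)

def get_support_from_vector_alt (bitset : Int) (bitset_slot_size : Int) (first_zero_mask : Int) (last_ones_mask : Int) : List Int :=
  let temp := PySem.Int.band (bitset >>> 1) first_zero_mask
  let b1 := PySem.Int.bor bitset temp
  let x := pvSmear first_zero_mask (bitset_slot_size - 1).toNat b1 b1
  let y := PySem.Int.band x last_ones_mask
  let i : Nat := PySem.Int.bitLength y
  let cs := pvBLoop y bitset_slot_size i (i:Int) 0 0
  [cs.1, cs.2]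

-- ===== PRECONDITION & SPEC =====
-- Pre_ excludes exactly the non-returning inputs: at bitset_slot_size = 0 A always raises
-- ZeroDivisionError (math.ceil(i / 0)), and at negative slot sizes both A and B loop forever
-- unless the first-smeared-and-masked bitset is zero (that benign corner stays inside Pre_).
def Pre_get_support_from_vector (bitset : Int) (bitset_slot_size : Int) (first_zero_mask : Int) (last_ones_mask : Int) : Prop :=
  1 ≤ bitset_slot_size ∨
  (bitset_slot_size < 0 ∧
    PySem.Int.band (PySem.Int.bor bitset (PySem.Int.band (bitset >>> 1) first_zero_mask)) last_ones_mask = 0)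
instance (bitset : Int) (bitset_slot_size : Int) (first_zero_mask : Int) (last_ones_mask : Int) : Decidable (Pre_get_support_from_vector bitset bitset_slot_size first_zero_mask last_ones_mask) := by unfold Pre_get_support_from_vector; infer_instance
def pvWitness_get_support_from_vector : Int × Int × Int × Int := (5, 2, 2, 3)

def Spec_get_support_from_vector (bitset : Int) (bitset_slot_size : Int) (first_zero_mask : Int) (last_ones_mask : Int) (out : List Int) : Prop := out = get_support_from_vector_alt bitset bitset_slot_size first_zero_mask last_ones_mask
instance (bitset : Int) (bitset_slot_size : Int) (first_zero_mask : Int) (last_ones_mask : Int) (out : List Int) : Decidable (Spec_get_support_from_vector bitset bitset_slot_size first_zero_mask last_ones_mask out) := by unfold Spec_get_support_from_vector; infer_instance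

-- ===== CLAIM (what is proved, stated in full; the proofs are below) =====
def Claim_equal_get_support_from_vector : Prop := ∀ (bitset : Int) (bitset_slot_size : Int) (first_zero_mask : Int) (last_ones_mask : Int), Dom_get_support_from_vector bitset bitset_slot_size first_zero_mask last_ones_mask → Pre_get_support_from_vector bitset bitset_slot_size first_zero_mask last_ones_mask → Spec_get_support_from_vector bitset bitset_slot_size first_zero_mask last_ones_mask (get_support_from_vector bitset bitset_slot_size first_zero_mask last_ones_mask)

-- ===== LEMMAS AND PROOFS =====

-- number of iterations both loops make from counter i (ceiling of i / slot, 0 when i ≤ 0)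
def pvIters (slot i : Int) : Nat := (-(PySem.Int.floordiv (-i) slot)).toNat

lemma pvIters_nonpos {slot i : Int} (hs : 1 ≤ slot) (hi : i ≤ 0) : pvIters slot i = 0 := by
  unfold pvIters
  rw [PySem.Int.floordiv_eq_ediv_of_pos (by omega)]
  have : 0 ≤ (-i) / slot := Int.ediv_nonneg (by omega) (by omega)
  omega

lemma pvIters_pos {slot i : Int} (hs : 1 ≤ slot) (hi : 0 < i) :
    pvIters slot i = pvIters slot (i - slot) + 1 := by
  unfold pvIters
  rw [PySem.Int.floordiv_eq_ediv_of_pos (by omega), PySem.Int.floordiv_eq_ediv_of_pos (by omega)]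
  have h1 : (-(i - slot)) / slot = (-i) / slot + 1 := by
    rw [show -(i - slot) = -i + 1 * slot by ring]
    exact Int.add_mul_ediv_right _ _ (by omega)
  have h2 : (-i) / slot < 0 := Int.ediv_neg_of_neg_of_pos (by omega) (by omega)
  omega

lemma pvIters_le_self {slot i : Int} (hs : 1 ≤ slot) (hi : 0 ≤ i) :
    (pvIters slot i : Int) ≤ i := by
  unfold pvIters
  rw [PySem.Int.floordiv_eq_ediv_of_pos (by omega)]
  have hdm := Int.mul_ediv_add_emod (-i) slot
  have hr0 : 0 ≤ (-i) % slot := Int.emod_nonneg _ (by omega)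
  have hrlt : (-i) % slot < slot := Int.emod_lt_of_pos _ (by omega)
  have hq : (-i) / slot ≤ 0 := Int.ediv_nonpos_of_nonpos_of_neg (by omega) (by omega)
  set q := (-i) / slot with hqdef
  set r := (-i) % slot with hrdef
  have hkey : -q ≤ i := by
    rcases eq_or_lt_of_le hq with h | h
    · omega
    · have hp : 0 ≤ (slot - 1) * (-q - 1) := mul_nonneg (by omega) (by omega)
      nlinarith
  omega

-- bit-level decompositions of Nat.land / Nat.lor
lemma pvLandBits (a b : Nat) (x y : Bool) :
    (2*a + x.toNat) &&& (2*b + y.toNat) = 2*(a &&& b) + (x && y).toNat := by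
  have h := Nat.bitwise_bit (f := and) (by simp) x a y b
  simp only [Nat.bit_val] at h
  simpa [Nat.land] using h

lemma pvLorBits (a b : Nat) (x y : Bool) :
    (2*a + x.toNat) ||| (2*b + y.toNat) = 2*(a ||| b) + (x || y).toNat := by
  have h := Nat.bitwise_bit (f := or) (by simp) x a y b
  simp only [Nat.bit_val] at h
  simpa [Nat.lor] using h

lemma pvLorPow (k : Nat) : ∀ w : Nat, (w * 2^(k+1)) ||| 2^k = w * 2^(k+1) + 2^k := by
  induction k with
  | zero =>
    intro w
    have := pvLandBits 0 0 false false
    have h := pvLorBits w 0 false true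
    simpa [mul_comm] using h
  | succ k ih =>
    intro w
    have h := pvLorBits (w * 2^(k+1)) (2^k) false false
    simp only [Bool.toNat_false, add_zero, Bool.false_or] at h
    calc w * 2^(k+1+1) ||| 2^(k+1)
        = 2*(w * 2^(k+1)) ||| 2*(2^k) := by ring_nf
      _ = 2*((w * 2^(k+1)) ||| 2^k) := by simpa [add_zero] using h
      _ = w * 2^(k+1+1) + 2^(k+1) := by rw [ih w]; ring

-- bitCount of a Horner step
lemma pvBcDouble (v b : Int) (hv : 0 ≤ v) (hb : b = 0 ∨ b = 1) :
    PySem.Int.bitCount (v*2+b) = PySem.Int.bitCount v + b.toNat := by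
  by_cases h0 : v = 0 ∧ b = 0
  · simp [h0.1, h0.2]
  · have hm : (0:Nat) < 2 * v.toNat + b.toNat := by rcases hb with h | h <;> omega
    have hcast : v*2+b = ((2 * v.toNat + b.toNat : Nat) : Int) := by push_cast; omega
    rw [hcast, PySem.Int.bitCount_natCast hm]
    have h2 : (2 * v.toNat + b.toNat) % 2 = b.toNat := by rcases hb with h | h <;> simp [h] <;> omega
    have h3 : (2 * v.toNat + b.toNat) / 2 = v.toNat := by rcases hb with h | h <;> simp [h] <;> omega
    rw [h2, h3]
    have : ((v.toNat : Int)) = v := by omega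
    rw [this]; omega

-- n & (n-1) clears the lowest set bit
lemma pvLandPred (n : Nat) (h : 0 < n) :
    (n &&& (n-1)) < n ∧ PySem.Int.bitCount ((n &&& (n-1) : Nat) : Int) + 1 = PySem.Int.bitCount (n : Int) := by
  induction n using Nat.strong_induction_on with
  | _ n ih =>
    rcases Nat.even_or_odd n with ⟨m, hm⟩ | ⟨m, hm⟩
    · -- n = 2m, m > 0
      have hm0 : 0 < m := by omega
      have hland : n &&& (n-1) = 2*(m &&& (m-1)) := by
        calc n &&& (n-1) = (2*m + (false:Bool).toNat) &&& (2*(m-1) + (true:Bool).toNat) := by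
              congr 1 <;> simp <;> omega
          _ = 2*(m &&& (m-1)) + ((false && true : Bool)).toNat := pvLandBits m (m-1) false true
          _ = 2*(m &&& (m-1)) := by simp
      obtain ⟨ihlt, ihbc⟩ := ih m (by omega) hm0
      constructor
      · omega
      · rw [hland]
        have e1 : ((2*(m &&& (m-1)) : Nat) : Int) = ((m &&& (m-1) : Nat) : Int) * 2 + 0 := by
          push_cast
          ring
        have e2 : ((n : Nat) : Int) = ((m : Nat) : Int) * 2 + 0 := by push_cast; omega
        rw [e1, e2, pvBcDouble _ 0 (by positivity) (Or.inl rfl), pvBcDouble _ 0 (by positivity) (Or.inl rfl)]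
        omega
    · -- n = 2m+1 : n & (n-1) = n-1 = 2m
      have hland : n &&& (n-1) = 2*m := by
        calc n &&& (n-1) = (2*m + (true:Bool).toNat) &&& (2*m + (false:Bool).toNat) := by
              congr 1 <;> simp <;> omega
          _ = 2*(m &&& m) + ((true && false : Bool)).toNat := pvLandBits m m true false
          _ = 2*m := by simp
      constructor
      · omega
      · rw [hland]
        have e1 : ((2*m : Nat) : Int) = ((m : Nat) : Int) * 2 + 0 := by push_cast; ring
        have e2 : ((n : Nat) : Int) = ((m : Nat) : Int) * 2 + 1 := by push_cast; omega
        rw [e1, e2, pvBcDouble _ 0 (by positivity) (Or.inl rfl), pvBcDouble _ 1 (by positivity) (Or.inr rfl)]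
        omega

-- Kernighan's loop computes bitCount on nonnegative values
lemma pvKernEq : ∀ (f : Nat) (v w : Int), 0 ≤ v → v.toNat < f →
    pvHammingLoop f v w = w + (PySem.Int.bitCount v : Int) := by
  intro f
  induction f with
  | zero => intro v w _ h; omega
  | succ f ih =>
    intro v w hv hlt
    by_cases h0 : v = 0
    · simp [pvHammingLoop, h0]
    · have hvpos : 0 < v := by omega
      have hveq : ((v.toNat : Nat) : Int) = v := by omega
      have hband : PySem.Int.band v (v-1) = ((v.toNat &&& (v.toNat - 1) : Nat) : Int) := by
        rw [PySem.Int.band_of_nonneg hv (by omega), show (v-1).toNat = v.toNat - 1 by omega]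
      obtain ⟨hlt', hbc⟩ := pvLandPred v.toNat (by omega)
      rw [hveq] at hbc
      have hrec := ih ((v.toNat &&& (v.toNat - 1) : Nat) : Int) (w+1) (by positivity)
        (by rw [Int.toNat_natCast]; omega)
      simp only [pvHammingLoop, if_pos h0]
      rw [hband, hrec]
      omega

-- the two main loops agree: A's placement at position L-c-1 equals B's Horner build,
-- and B's running count is the bitCount of its accumulator
lemma pvLoopEq (y slot L : Int) (hs : 1 ≤ slot) :
    ∀ (f : Nat) (i cA cB v : Int), 0 ≤ v → pvIters slot i ≤ f → L - cA = (pvIters slot i : Int) →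
      pvALoop y slot L f i cA (v * 2^(pvIters slot i)) = (pvBLoop y slot f i cB v).2
      ∧ (pvBLoop y slot f i cB v).1 = cB + ((PySem.Int.bitCount ((pvBLoop y slot f i cB v).2) : Int) - (PySem.Int.bitCount v : Int))
      ∧ 0 ≤ (pvBLoop y slot f i cB v).2 := by
  intro f
  induction f with
  | zero =>
    intro i cA cB v hv hf hL
    have hr : pvIters slot i = 0 := by omega
    simp [pvALoop, pvBLoop, hr, hv]
  | succ f ih =>
    intro i cA cB v hv hf hL
    by_cases hi : i > 0
    · have hr := pvIters_pos hs hi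
      set r' := pvIters slot (i - slot) with hr'def
      set b := PySem.Int.band (y >>> (i-1).toNat) 1 with hbdef
      have hb : b = 0 ∨ b = 1 := by
        rw [hbdef, PySem.Int.band_one]
        have h1 := PySem.Int.mod_nonneg (y >>> (i-1).toNat) (show (0:Int) < 2 by omega)
        have h2 := PySem.Int.mod_lt (y >>> (i-1).toNat) (show (0:Int) < 2 by omega)
        omega
      have hv' : 0 ≤ v * 2 + b := by rcases hb with h | h <;> omega
      have hstep : (if PySem.Int.band (y >>> (i-1).toNat) 1 ≠ 0 then
            PySem.Int.bor (v * 2^(pvIters slot i)) ((1:Int) <<< (L - cA - 1).toNat) else v * 2^(pvIters slot i))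
          = (v * 2 + b) * 2^r' := by
        rcases hb with h | h
        · rw [if_neg (by rw [← hbdef, h]; simp), h, hr]
          ring
        · rw [if_pos (by rw [← hbdef, h]; simp)]
          have hLc : (L - cA - 1).toNat = r' := by omega
          rw [hLc, Int.shiftLeft_eq, one_mul, hr]
          obtain ⟨vn, rfl⟩ : ∃ n : Nat, v = (n : Int) := ⟨v.toNat, (Int.toNat_of_nonneg hv).symm⟩
          rw [show ((vn:Int) * 2^(r'+1)) = ((vn * 2^(r'+1) : Nat) : Int) by push_cast; ring,
              show ((2:Int)^r') = ((2^r' : Nat) : Int) by push_cast; ring]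
          rw [PySem.Int.bor_of_nonneg (by positivity) (by positivity), Int.toNat_natCast,
              Int.toNat_natCast, pvLorPow r' vn]
          rw [h]; push_cast; ring
      have ihh := ih (i - slot) (cA + 1) (cB + b) (v * 2 + b) hv' (by omega) (by omega)
      have hbc := pvBcDouble v b hv hb
      have hbtn : b = (b.toNat : Int) := by rcases hb with h | h <;> simp [h]
      constructor
      · show pvALoop y slot L (f+1) i cA (v * 2^(pvIters slot i)) = _
        simp only [pvALoop, if_pos hi, pvBLoop, ← hbdef]
        rw [hstep]
        exact ihh.1
      constructor
      · simp only [pvBLoop, if_pos hi, ← hbdef]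
        rw [ihh.2.1, hbc]
        omega
      · simp only [pvBLoop, if_pos hi, ← hbdef]
        exact ihh.2.2
    · have hr : pvIters slot i = 0 := pvIters_nonpos hs (by omega)
      simp [pvALoop, pvBLoop, hi, hr, hv]

-- A's peeled-and-folded smear equals B's uniform recursion
lemma pvSmearFold (fzm : Int) : ∀ (l : List Int) (t x : Int),
    (l.foldl (fun (tb : Int × Int) _ =>
        let t' := PySem.Int.band (tb.1 >>> 1) fzm
        (t', PySem.Int.bor tb.2 t')) (t, x)).2
    = pvSmear fzm l.length t x := by
  intro l
  induction l with
  | nil => intro t x; simp [pvSmear]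
  | cons a l ih => intro t x; simp [pvSmear, ih]

-- ===== VERDICT (by name: the statement is the Claim_ definition above) =====
theorem get_support_from_vector_spec : Claim_equal_get_support_from_vector := by
  intro bitset slot fzm lom _hDom hPre
  rcases hPre with hs | ⟨hneg, hzero⟩
  case inr =>
    -- negative slot size, the masked bitset is zero: both loops make no iteration
    unfold Spec_get_support_from_vector get_support_from_vector get_support_from_vector_alt
    simp only []
    rw [PySem.List.pyRange_one_eq_nil (by omega)]
    simp only [List.foldl, show (slot - 1).toNat = 0 by omega, pvSmear, hzero]
    simp [pvALoop, pvBLoop, hamming_weight, pvHammingLoop]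
  unfold Spec_get_support_from_vector get_support_from_vector get_support_from_vector_alt
  simp only []
  -- the smeared bitsets agree
  have hlen : (PySem.List.pyRange 0 (slot - 1) 1).length = (slot - 1).toNat := by
    have : (slot - 1 : Int) = (((slot - 1).toNat : Nat) : Int) := by omega
    rw [this, PySem.List.pyRange_zero_natCast]
    simp
  have hsmear :
      ((PySem.List.pyRange 0 (slot - 1) 1).foldl
        (fun (tb : Int × Int) _ =>
          let t := PySem.Int.band (tb.1 >>> 1) fzm
          (t, PySem.Int.bor tb.2 t))
        (PySem.Int.bor bitset (PySem.Int.band (bitset >>> 1) fzm),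
         PySem.Int.bor bitset (PySem.Int.band (bitset >>> 1) fzm))).2
      = pvSmear fzm (slot - 1).toNat (PySem.Int.bor bitset (PySem.Int.band (bitset >>> 1) fzm))
          (PySem.Int.bor bitset (PySem.Int.band (bitset >>> 1) fzm)) := by
    rw [pvSmearFold, hlen]
  rw [hsmear]
  set y := PySem.Int.band (pvSmear fzm (slot - 1).toNat
      (PySem.Int.bor bitset (PySem.Int.band (bitset >>> 1) fzm))
      (PySem.Int.bor bitset (PySem.Int.band (bitset >>> 1) fzm))) lom with hy
  set iN : Nat := PySem.Int.bitLength y with hiN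
  set L : Int := -(PySem.Int.floordiv (-(iN:Int)) slot) with hLdef
  have hIters : (pvIters slot (iN : Int) : Int) = L := by
    unfold pvIters
    rw [hLdef]
    have : 0 ≤ -(PySem.Int.floordiv (-(iN:Int)) slot) := by
      rw [PySem.Int.floordiv_eq_ediv_of_pos (by omega)]
      have := Int.ediv_nonpos_of_nonpos_of_neg (show -(iN:Int) ≤ 0 by omega) (show (0:Int) < slot by omega)
      omega
    omega
  have hfuel : pvIters slot (iN : Int) ≤ iN := by
    have h1 := pvIters_le_self (i := (iN : Int)) hs (by omega)
    omega
  have hmain := pvLoopEq y slot L hs iN (iN : Int) 0 0 0 le_rfl hfuel (by omega)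
  rw [mul_comm, mul_zero] at hmain
  obtain ⟨h1, h2, h3⟩ := hmain
  rw [h1]
  have hw : hamming_weight ((pvBLoop y slot iN (iN:Int) 0 0).2) = (pvBLoop y slot iN (iN:Int) 0 0).1 := by
    unfold hamming_weight
    rw [pvKernEq _ _ _ h3 (by omega), h2]
    simp
  rw [hw]
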